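-- pv_equiv track=rewrite | github.com/carlosmoralesg/ocr-facturas | ocr_facturas.py | buscar_valor_multiple
-- ===== SOURCE A (Python) =====
-- def buscar_valor_multiple(texto, clave, ocurrencia=1, cortar_en=None, usar_dos_puntos=True):
--     contador = 0
--     for line in texto.split("\n"):
--         if clave.lower() in line.lower():
--             contador += 1
--             if contador == ocurrencia:
--                 index = line.lower().find(clave.lower())
--                 valor = line[index + len(clave):].strip()
--                 if usar_dos_puntos and valor.startswith(":"):
--                     valor = valor[1:].strip()
--                 if cortar_en and cortar_en.lower() in valor.lower():
--                     corte_idx = valor.lower().find(cortar_en.lower())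
--                     valor = valor[:corte_idx].strip()
--                 return valor
--     return "No encontrado"
-- ===== SOURCE B (Python) =====
-- def buscar_valor_multiple(texto, clave, ocurrencia=1, cortar_en=None, usar_dos_puntos=True):
--     # Substring search over the remaining text: no line splitting, no per-line scan.
--     # A key containing a newline can never occur inside a single line.
--     if "\n" in clave:
--         return "No encontrado"
--     k = clave.lower()
--     resto = texto
--     n = ocurrencia
--     while True:
--         low = resto.lower()
--         i = low.find(k)
--         if i == -1:
--             return "No encontrado"
--         nl = low.find("\n", i)
--         fin = len(resto) if nl == -1 else nl
--         n -= 1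
--         if n == 0:
--             valor = resto[i + len(clave):fin].strip()
--             if usar_dos_puntos and valor.startswith(":"):
--                 valor = valor[1:].strip()
--             if cortar_en and cortar_en.lower() in valor.lower():
--                 corte_idx = valor.lower().find(cortar_en.lower())
--                 valor = valor[:corte_idx].strip()
--             return valor
--         if nl == -1:
--             return "No encontrado"
--         resto = resto[nl + 1:]
-- ===== Notes on version B (the rewrite author's own statement) =====
-- stated objective: alternative
-- what changed: B never splits the text into lines: it repeatedly substring-searches the key in the lowered remaining text and jumps to the next newline (resto = resto[nl+1:]), extracting directly between the hit and the newline, instead of A's split('\n') plus per-line membership test and occurrence counter.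
import Mathlib
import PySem

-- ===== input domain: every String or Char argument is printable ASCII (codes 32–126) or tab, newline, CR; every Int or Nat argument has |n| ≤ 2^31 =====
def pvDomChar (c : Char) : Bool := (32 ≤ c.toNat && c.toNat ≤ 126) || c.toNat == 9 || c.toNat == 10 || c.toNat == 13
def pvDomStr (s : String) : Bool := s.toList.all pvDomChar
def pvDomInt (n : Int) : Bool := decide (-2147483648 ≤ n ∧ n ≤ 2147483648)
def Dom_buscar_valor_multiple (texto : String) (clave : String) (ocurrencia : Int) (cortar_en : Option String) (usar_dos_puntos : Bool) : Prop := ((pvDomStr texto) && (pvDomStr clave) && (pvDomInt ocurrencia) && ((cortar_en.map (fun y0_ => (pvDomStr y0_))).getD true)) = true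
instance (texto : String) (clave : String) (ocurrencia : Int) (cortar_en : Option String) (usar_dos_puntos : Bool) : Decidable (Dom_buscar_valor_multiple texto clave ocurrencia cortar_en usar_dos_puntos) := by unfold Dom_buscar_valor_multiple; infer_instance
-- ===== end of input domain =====

-- B replaces A's split-into-lines + per-line membership loop by a substring search over the
-- shrinking remaining text (find the key, jump to the next newline); objective: alternative.

-- ===== PORT A =====
-- the common tail of the extraction: the ':'-handling and cortar_en lines are the SAME Python
-- lines in Source A and Source B, so both ports share this helper
def pvTail (valor : List Char) (cortar_en : Option String) (usar_dos_puntos : Bool) : List Char :=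
  let valor := if usar_dos_puntos && PySem.Chars.startswith valor [':'] then
                 PySem.Chars.strip (PySem.List.slice valor (some 1) none)
               else valor
  match cortar_en with
  | none => valor
  | some c =>
      if (!(c == "")) && PySem.Chars.isIn (PySem.Chars.lower c.toList) (PySem.Chars.lower valor) then
        PySem.Chars.strip (PySem.List.slice valor none
          (some (PySem.Chars.find (PySem.Chars.lower valor) (PySem.Chars.lower c.toList))))
      else valor

-- A's per-line extraction: index = line.lower().find(clave.lower()); valor = line[index+len(clave):].strip()
def pvExtractA (line clave : List Char) (cortar_en : Option String) (usar_dos_puntos : Bool) : List Char :=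
  let index := PySem.Chars.find (PySem.Chars.lower line) (PySem.Chars.lower clave)
  pvTail (PySem.Chars.strip (PySem.List.slice line (some (index + (clave.length : Int))) none))
    cortar_en usar_dos_puntos

-- A's loop: count matching lines, extract at the ocurrencia-th
def pvLoopA (lines : List (List Char)) (clave : List Char) (contador ocurrencia : Int)
    (cortar_en : Option String) (usar_dos_puntos : Bool) : String :=
  match lines with
  | [] => "No encontrado"
  | line :: rest =>
      if PySem.Chars.isIn (PySem.Chars.lower clave) (PySem.Chars.lower line) then
        if contador + 1 = ocurrencia then String.mk (pvExtractA line clave cortar_en usar_dos_puntos)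
        else pvLoopA rest clave (contador + 1) ocurrencia cortar_en usar_dos_puntos
      else pvLoopA rest clave contador ocurrencia cortar_en usar_dos_puntos

def buscar_valor_multiple (texto : String) (clave : String) (ocurrencia : Int) (cortar_en : Option String) (usar_dos_puntos : Bool) : String :=
  pvLoopA ((PySem.Chars.split? texto.toList "\n".toList).getD []) clave.toList 0 ocurrencia cortar_en usar_dos_puntos

-- ===== PORT B =====
-- termination fact for B's while-loop: the remaining text strictly shrinks at 'resto = resto[nl+1:]'
theorem pvSliceLt (resto kl : List Char)
    (hi : ¬ PySem.Chars.find (PySem.Chars.lower resto) kl = -1)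
    (hnl : ¬ PySem.Chars.findFrom (PySem.Chars.lower resto) ['\n']
        (PySem.Chars.find (PySem.Chars.lower resto) kl) = -1) :
    (PySem.List.slice resto (some (PySem.Chars.findFrom (PySem.Chars.lower resto) ['\n']
        (PySem.Chars.find (PySem.Chars.lower resto) kl) + 1)) none).length < resto.length := by
  have hlen : (PySem.Chars.lower resto).length = resto.length := by simp [PySem.Chars.lower]
  set low := PySem.Chars.lower resto with hlow
  set i := PySem.Chars.find low kl with hi'
  have h0 : -1 ≤ i := PySem.Chars.neg_one_le_find low kl
  have hile : i ≤ low.length := PySem.Chars.find_le_length low kl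
  have hcast : i = ((i.toNat : Nat) : Int) := by omega
  have hkle : i.toNat ≤ low.length := by omega
  rw [hcast, PySem.Chars.findFrom_natCast low ['\n'] i.toNat hkle] at hnl ⊢
  by_cases hr : PySem.Chars.find (low.drop i.toNat) ['\n'] = -1
  · simp [hr] at hnl
  · have hr1 : -1 ≤ PySem.Chars.find (low.drop i.toNat) ['\n'] :=
      PySem.Chars.neg_one_le_find _ _
    have hr0 : 0 ≤ PySem.Chars.find (low.drop i.toNat) ['\n'] := by omega
    set r := PySem.Chars.find (low.drop i.toNat) ['\n'] with hr'
    have hspec := (PySem.Chars.find_spec (s := low.drop i.toNat) (sub := ['\n']) hr0).1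
    have hne : ((low.drop i.toNat).drop r.toNat) ≠ [] := by
      intro h; rw [h] at hspec; simpa using hspec.length_le
    have hlt : r.toNat < low.length - i.toNat := by
      by_contra hge
      exact hne (List.drop_eq_nil_of_le (by simp; omega))
    rw [if_neg hr, PySem.List.slice_from resto (show (0:Int) ≤ ↑i.toNat + r + 1 by omega)]
    simp only [List.length_drop]
    omega

def pvLoopB (resto clave kl : List Char) (n : Int) (cortar_en : Option String) (usar_dos_puntos : Bool) : String :=
  let low := PySem.Chars.lower resto
  let i := PySem.Chars.find low kl
  if hi : i = -1 then "No encontrado"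
  else
    let nl := PySem.Chars.findFrom low ['\n'] i
    let fin : Int := if nl = -1 then (resto.length : Int) else nl
    if n - 1 = 0 then
      String.mk (pvTail (PySem.Chars.strip
        (PySem.List.slice resto (some (i + (clave.length : Int))) (some fin))) cortar_en usar_dos_puntos)
    else if hnl : nl = -1 then "No encontrado"
    else pvLoopB (PySem.List.slice resto (some (nl + 1)) none) clave kl (n - 1) cortar_en usar_dos_puntos
termination_by resto.length
decreasing_by exact pvSliceLt resto kl hi hnl

def buscar_valor_multiple_alt (texto : String) (clave : String) (ocurrencia : Int) (cortar_en : Option String) (usar_dos_puntos : Bool) : String :=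
  if PySem.Chars.isIn "\n".toList clave.toList then "No encontrado"
  else pvLoopB texto.toList clave.toList (PySem.Chars.lower clave.toList) ocurrencia cortar_en usar_dos_puntos

-- ===== PRECONDITION & SPEC =====
def Spec_buscar_valor_multiple (texto : String) (clave : String) (ocurrencia : Int) (cortar_en : Option String) (usar_dos_puntos : Bool) (out : String) : Prop := out = buscar_valor_multiple_alt texto clave ocurrencia cortar_en usar_dos_puntos
instance (texto : String) (clave : String) (ocurrencia : Int) (cortar_en : Option String) (usar_dos_puntos : Bool) (out : String) : Decidable (Spec_buscar_valor_multiple texto clave ocurrencia cortar_en usar_dos_puntos out) := by unfold Spec_buscar_valor_multiple; infer_instance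

-- ===== CLAIM (what is proved, stated in full; the proofs are below) =====
def Claim_equal_buscar_valor_multiple : Prop := ∀ (texto : String) (clave : String) (ocurrencia : Int) (cortar_en : Option String) (usar_dos_puntos : Bool), Dom_buscar_valor_multiple texto clave ocurrencia cortar_en usar_dos_puntos → Spec_buscar_valor_multiple texto clave ocurrencia cortar_en usar_dos_puntos (buscar_valor_multiple texto clave ocurrencia cortar_en usar_dos_puntos)

-- ===== LEMMAS AND PROOFS =====

-- --- lowercase facts ---
theorem pvLower_append (a b : List Char) : PySem.Chars.lower (a ++ b) = PySem.Chars.lower a ++ PySem.Chars.lower b := by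
  simp [PySem.Chars.lower]

theorem pvLower_length (a : List Char) : (PySem.Chars.lower a).length = a.length := by
  simp [PySem.Chars.lower]

theorem pvLower_cons (c : Char) (a : List Char) : PySem.Chars.lower (c :: a) = PySem.Chars.lowerChar c :: PySem.Chars.lower a := by
  simp [PySem.Chars.lower]

theorem pvLowerChar_nl (c : Char) : PySem.Chars.lowerChar c = '\n' ↔ c = '\n' := by
  unfold PySem.Chars.lowerChar PySem.Chars.isupper
  split_ifs with h
  · simp only [Bool.and_eq_true, decide_eq_true_eq, Char.le_def, UInt32.le_iff_toNat_le] at h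
    have h1 : 65 ≤ c.toNat := h.1
    have h2 : c.toNat ≤ 90 := h.2
    constructor
    · intro he
      exfalso
      have hv : (Char.ofNat (c.toNat + 32)).toNat = c.toNat + 32 := by
        rw [Char.toNat_ofNat, if_pos (Or.inl (by omega))]
      rw [he] at hv
      have : ('\n').toNat = 10 := by decide
      omega
    · intro he
      subst he
      exfalso
      have : ('\n').toNat = 10 := by decide
      omega
  · exact Iff.rfl

theorem pvNl_mem_lower (s : List Char) : '\n' ∈ PySem.Chars.lower s ↔ '\n' ∈ s := by
  simp only [PySem.Chars.lower, List.mem_map]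
  constructor
  · rintro ⟨c, hc, he⟩; rw [(pvLowerChar_nl c).1 he] at hc; exact hc
  · intro h; exact ⟨'\n', h, (pvLowerChar_nl '\n').2 rfl⟩

-- --- find characterization ---
theorem pvInfix_iff (sub s : List Char) : sub <:+: s ↔ ∃ j, sub <+: List.drop j s := by
  rw [← PySem.Chars.isIn_iff_infix, ← PySem.Chars.exists_prefix_drop_iff_isIn]

theorem pvFind_eq_coe (s sub : List Char) (j : Nat) (hj : sub <+: List.drop j s)
    (hmin : ∀ i < j, ¬ sub <+: List.drop i s) : PySem.Chars.find s sub = (j : Int) := by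
  have hinf : sub <:+: s := (pvInfix_iff sub s).2 ⟨j, hj⟩
  have h0 : 0 ≤ PySem.Chars.find s sub := (PySem.Chars.find_nonneg_iff s sub).2 hinf
  obtain ⟨hpre, hmin'⟩ := PySem.Chars.find_spec h0
  have : (PySem.Chars.find s sub).toNat = j := by
    rcases lt_trichotomy (PySem.Chars.find s sub).toNat j with h|h|h
    · exact absurd hpre (hmin _ h)
    · exact h
    · exact absurd hj (hmin' j h)
  omega

theorem pvPrefix_of_prefix_append (sub l₁ l₂ : List Char) (h : sub <+: l₁ ++ l₂)
    (hl : sub.length ≤ l₁.length) : sub <+: l₁ := by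
  rw [List.prefix_iff_eq_take] at h ⊢
  rwa [List.take_append_of_le_length hl] at h

theorem pvFind_append_left (x y sub : List Char) (h : sub <:+: x) :
    PySem.Chars.find (x ++ y) sub = PySem.Chars.find x sub := by
  have h0 : 0 ≤ PySem.Chars.find x sub := (PySem.Chars.find_nonneg_iff x sub).2 h
  obtain ⟨hpre, hmin⟩ := PySem.Chars.find_spec h0
  set q := (PySem.Chars.find x sub).toNat with hq
  have hle : q + sub.length ≤ x.length := by
    have := hpre.length_le
    have hql : q ≤ x.length := by
      have := PySem.Chars.find_le_length x sub; omega
    simp [List.length_drop] at this; omega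
  have : PySem.Chars.find (x ++ y) sub = (q : Int) := by
    apply pvFind_eq_coe
    · rw [List.drop_append_of_le_length (by omega)]
      exact hpre.trans (List.prefix_append _ _)
    · intro i hi hcon
      rw [List.drop_append_of_le_length (by omega)] at hcon
      exact hmin i hi (pvPrefix_of_prefix_append _ _ _ hcon (by simp [List.length_drop]; omega))
  omega

theorem pvFind_nl_none (s : List Char) (h : '\n' ∉ s) : PySem.Chars.find s ['\n'] = -1 := by
  rw [PySem.Chars.find_eq_neg_one_iff]
  intro hinf
  obtain ⟨j, hj⟩ := (pvInfix_iff _ s).1 hinf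
  rw [List.cons_prefix_iff] at hj
  obtain ⟨l', he, -⟩ := hj
  have : '\n' ∈ List.drop j s := by rw [he]; exact List.mem_cons_self
  exact h (List.mem_of_mem_drop this)

theorem pvFind_nl_of_split (x y : List Char) (h : '\n' ∉ x) :
    PySem.Chars.find (x ++ '\n' :: y) ['\n'] = (x.length : Int) := by
  apply pvFind_eq_coe
  · rw [List.drop_left' rfl]
    exact ⟨y, rfl⟩
  · intro i hi hcon
    rw [List.cons_prefix_iff] at hcon
    obtain ⟨l', he, -⟩ := hcon
    rw [List.drop_append_of_le_length (by omega)] at he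
    cases hd : List.drop i x with
    | nil =>
        exact absurd (List.drop_eq_nil_iff.1 hd) (by omega)
    | cons a as =>
        rw [hd, List.cons_append, List.cons.injEq] at he
        apply h
        have : a ∈ List.drop i x := by rw [hd]; exact List.mem_cons_self
        rw [he.1] at this
        exact List.mem_of_mem_drop this

theorem pvFind_shift (a b sub : List Char) (h : ∀ j < a.length, ¬ sub <+: List.drop j (a ++ b)) :
    PySem.Chars.find (a ++ b) sub =
      if PySem.Chars.find b sub = -1 then -1 else (a.length : Int) + PySem.Chars.find b sub := by
  by_cases hb : PySem.Chars.find b sub = -1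
  · rw [if_pos hb, PySem.Chars.find_eq_neg_one_iff]
    intro hinf
    obtain ⟨j, hj⟩ := (pvInfix_iff _ _).1 hinf
    by_cases hja : j < a.length
    · exact h j hja hj
    · have : sub <+: List.drop (j - a.length) b := by
        rw [List.drop_append, List.drop_eq_nil_of_le (by omega)] at hj
        simpa using hj
      exact (PySem.Chars.find_eq_neg_one_iff b sub).1 hb ((pvInfix_iff _ _).2 ⟨_, this⟩)
  · have h0 : 0 ≤ PySem.Chars.find b sub := by
      have := PySem.Chars.neg_one_le_find b sub; omega
    obtain ⟨hpre, hmin⟩ := PySem.Chars.find_spec h0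
    set q := (PySem.Chars.find b sub).toNat with hq
    rw [if_neg hb]
    have : PySem.Chars.find (a ++ b) sub = ((a.length + q : Nat) : Int) := by
      apply pvFind_eq_coe
      · rw [List.drop_append, List.drop_eq_nil_of_le (by omega)]
        simpa using hpre
      · intro i hi hcon
        by_cases hia : i < a.length
        · exact h i hia hcon
        · rw [List.drop_append, List.drop_eq_nil_of_le (by omega)] at hcon
          simp at hcon
          exact hmin (i - a.length) (by omega) hcon
    omega

-- no match of a newline-free key can touch the first line's terminating newline
theorem pvNoCross (a' b' sub : List Char) (j : Nat) (hj : j ≤ a'.length) (hnl : '\n' ∉ sub)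
    (h : sub <+: List.drop j (a' ++ '\n' :: b')) : sub <+: List.drop j a' := by
  rw [List.drop_append_of_le_length hj] at h
  by_cases hlen : sub.length ≤ a'.length - j
  · exact pvPrefix_of_prefix_append _ _ _ h (by simp [List.length_drop]; omega)
  · exfalso
    rw [List.prefix_iff_eq_take, List.take_append] at h
    apply hnl
    rw [h]
    apply List.mem_append.2; right
    have : 0 < sub.length - (List.drop j a').length := by simp [List.length_drop]; omega
    rcases Nat.exists_eq_add_of_lt this with ⟨m, hm⟩
    simp only [List.length_drop]
    rw [show sub.length - (a'.length - j) = m + 1 by simp [List.length_drop] at hm ⊢; omega]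
    simp [List.take_succ_cons]

-- --- the split-on-'\n' machinery ---
def pvSplit : List Char → List (List Char)
  | [] => [[]]
  | c :: r => if c = '\n' then [] :: pvSplit r else (pvSplit r).modifyHead (c :: ·)

theorem pvSplit_ne_nil (t : List Char) : pvSplit t ≠ [] := by
  cases t with
  | nil => simp [pvSplit]
  | cons c r =>
      simp only [pvSplit]
      split_ifs
      · simp
      · cases h : pvSplit r with
        | nil => exact absurd h (pvSplit_ne_nil r)
        | cons a l => simp [List.modifyHead]

theorem pvGo_eq (fuel : Nat) : ∀ (l cur : List Char) (acc : List (List Char)), l.length < fuel →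
    PySem.Chars.splitOn.go ['\n'] fuel l cur acc
      = acc.reverse ++ (pvSplit l).modifyHead (cur.reverse ++ ·) := by
  induction fuel with
  | zero => intro l cur acc h; omega
  | succ f ih =>
      intro l cur acc h
      cases l with
      | nil =>
          show (cur.reverse :: acc).reverse = _
          simp [pvSplit]
      | cons c rest =>
          show (if ['\n'].isPrefixOf (c::rest) then
                  PySem.Chars.splitOn.go ['\n'] f (List.drop 1 (c::rest)) [] (cur.reverse :: acc)
                else PySem.Chars.splitOn.go ['\n'] f rest (c :: cur) acc) = _
          by_cases hc : c = '\n'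
          · subst hc
            rw [if_pos (by simp [List.isPrefixOf])]
            rw [ih _ _ _ (by simpa using by simp at h ⊢; omega)]
            simp [pvSplit, List.modifyHead]
            cases hs : pvSplit rest with
            | nil => exact absurd hs (pvSplit_ne_nil rest)
            | cons a l => simp [List.modifyHead]
          · rw [if_neg (by simp [List.isPrefixOf]; exact fun he => hc he.symm)]
            rw [ih _ _ _ (by simp at h ⊢; omega)]
            simp only [pvSplit, if_neg hc, List.modifyHead_modifyHead]
            congr 1
            cases hs : pvSplit rest with
            | nil => exact absurd hs (pvSplit_ne_nil rest)
            | cons a l => simp [List.modifyHead]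

theorem pvSplitOn_eq (t : List Char) : PySem.Chars.splitOn t ['\n'] = pvSplit t := by
  show PySem.Chars.splitOn.go ['\n'] (t.length + 1) t [] [] = _
  rw [pvGo_eq (t.length + 1) t [] [] (by omega)]
  simp
  cases hs : pvSplit t with
  | nil => exact absurd hs (pvSplit_ne_nil t)
  | cons a l => simp [List.modifyHead]

theorem pvSplit_of_not_mem (t : List Char) (h : '\n' ∉ t) : pvSplit t = [t] := by
  induction t with
  | nil => rfl
  | cons c r ih =>
      simp only [pvSplit]
      rw [if_neg (by intro hc; exact h (hc ▸ List.mem_cons_self))]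
      rw [ih (fun hm => h (List.mem_cons_of_mem _ hm))]
      rfl

theorem pvSplit_append (l1 t' : List Char) (h : '\n' ∉ l1) :
    pvSplit (l1 ++ '\n' :: t') = l1 :: pvSplit t' := by
  induction l1 with
  | nil => simp [pvSplit]
  | cons c r ih =>
      simp only [List.cons_append, pvSplit]
      rw [if_neg (by intro hc; exact h (hc ▸ List.mem_cons_self))]
      rw [ih (fun hm => h (List.mem_cons_of_mem _ hm))]
      rfl

theorem pvSplit_mem (t l : List Char) (h : l ∈ pvSplit t) : '\n' ∉ l := by
  induction t generalizing l with
  | nil =>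
      simp only [pvSplit, List.mem_singleton] at h
      subst h; simp
  | cons c r ih =>
      simp only [pvSplit] at h
      by_cases hc : c = '\n'
      · rw [if_pos hc] at h
        rcases List.mem_cons.1 h with h' | h'
        · subst h'; simp
        · exact ih l h'
      · rw [if_neg hc] at h
        cases hs : pvSplit r with
        | nil => exact absurd hs (pvSplit_ne_nil r)
        | cons a rest =>
            rw [hs, List.modifyHead] at h
            rcases List.mem_cons.1 h with h' | h'
            · subst h'
              intro hm
              rcases List.mem_cons.1 hm with h'' | h''
              · exact hc h''.symm
              · exact ih a (hs ▸ List.mem_cons_self) h''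
            · exact ih l (hs ▸ List.mem_cons_of_mem _ h')

theorem pvExists_first (c : Char) (t : List Char) (h : c ∈ t) :
    ∃ l1 t', t = l1 ++ c :: t' ∧ c ∉ l1 := by
  induction t with
  | nil => cases h
  | cons d r ih =>
      by_cases hd : d = c
      · exact ⟨[], r, by simp [hd], by simp⟩
      · rcases ih (by rcases List.mem_cons.1 h with h'|h'; exact absurd h'.symm hd; exact h') with ⟨l1, t', he, hn⟩
        exact ⟨d :: l1, t', by simp [he], by
          intro hm; rcases List.mem_cons.1 hm with h'|h'
          · exact hd h'.symm
          · exact hn h'⟩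

-- --- canonical value of both loops ---
def pvCanon (lines : List (List Char)) (clave : List Char) (n : Int)
    (cortar_en : Option String) (usar_dos_puntos : Bool) : String :=
  let ms := lines.filter (fun l => PySem.Chars.isIn (PySem.Chars.lower clave) (PySem.Chars.lower l))
  if 0 < n ∧ n ≤ (ms.length : Int) then
    match PySem.List.pyGet? ms (n - 1) with
    | some line => String.mk (pvExtractA line clave cortar_en usar_dos_puntos)
    | none => "No encontrado"
  else "No encontrado"

theorem pvCanon_cons_skip (l1 : List Char) (rest : List (List Char)) (clave : List Char) (n : Int)
    (cortar_en : Option String) (udp : Bool)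
    (h : PySem.Chars.isIn (PySem.Chars.lower clave) (PySem.Chars.lower l1) = false) :
    pvCanon (l1 :: rest) clave n cortar_en udp = pvCanon rest clave n cortar_en udp := by
  simp only [pvCanon, List.filter_cons, h, Bool.false_eq_true, if_false]

theorem pvCanon_cons_match (l1 : List Char) (rest : List (List Char)) (clave : List Char) (n : Int)
    (cortar_en : Option String) (udp : Bool)
    (h : PySem.Chars.isIn (PySem.Chars.lower clave) (PySem.Chars.lower l1) = true) :
    pvCanon (l1 :: rest) clave n cortar_en udp =
      if n = 1 then String.mk (pvExtractA l1 clave cortar_en udp)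
      else pvCanon rest clave (n - 1) cortar_en udp := by
  simp only [pvCanon, List.filter_cons, h, if_pos]
  by_cases hn : n = 1
  · subst hn
    rw [if_pos rfl, if_pos (by simp only [List.length_cons]; constructor <;> omega)]
    norm_num [PySem.List.pyGet?_zero_cons]
  · rw [if_neg hn]
    by_cases hc : 0 < n - 1 ∧ n - 1 ≤ ((rest.filter (fun l => PySem.Chars.isIn (PySem.Chars.lower clave) (PySem.Chars.lower l))).length : Int)
    · rw [if_pos hc, if_pos (by simp only [List.length_cons]; constructor <;> omega)]
      have hget : PySem.List.pyGet?
          (l1 :: rest.filter (fun l => PySem.Chars.isIn (PySem.Chars.lower clave) (PySem.Chars.lower l)))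
          (n - 1) = PySem.List.pyGet?
          (rest.filter (fun l => PySem.Chars.isIn (PySem.Chars.lower clave) (PySem.Chars.lower l)))
          (n - 1 - 1) := by
        rw [show n - 1 = ((n - 2).toNat : Int) + 1 by omega, PySem.List.pyGet?_cons_succ]
        congr 1; omega
      rw [hget]
    · rw [if_neg hc, if_neg (by simp only [List.length_cons]; intro hcon; omega)]

-- A's loop computes the canonical value
theorem pvLoopA_eq (clave : List Char) (ocurrencia : Int) (cortar_en : Option String)
    (udp : Bool) (lines : List (List Char)) : ∀ contador : Int,
    pvLoopA lines clave contador ocurrencia cortar_en udp =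
      pvCanon lines clave (ocurrencia - contador) cortar_en udp := by
  induction lines with
  | nil =>
      intro contador
      simp only [pvLoopA, pvCanon, List.filter_nil, List.length_nil, Int.natCast_zero]
      rw [if_neg (by omega)]
  | cons line rest ih =>
      intro contador
      by_cases hm : PySem.Chars.isIn (PySem.Chars.lower clave) (PySem.Chars.lower line) = true
      · rw [show pvLoopA (line :: rest) clave contador ocurrencia cortar_en udp =
              (if PySem.Chars.isIn (PySem.Chars.lower clave) (PySem.Chars.lower line) then
                if contador + 1 = ocurrencia then String.mk (pvExtractA line clave cortar_en udp)
                else pvLoopA rest clave (contador + 1) ocurrencia cortar_en udp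
              else pvLoopA rest clave contador ocurrencia cortar_en udp) from rfl,
           if_pos hm, pvCanon_cons_match _ _ _ _ _ _ hm]
        by_cases he : contador + 1 = ocurrencia
        · rw [if_pos he, if_pos (by omega)]
        · rw [if_neg he, if_neg (by omega), ih (contador + 1)]
          congr 1; omega
      · have hm' : PySem.Chars.isIn (PySem.Chars.lower clave) (PySem.Chars.lower line) = false := by
          simpa using hm
        rw [show pvLoopA (line :: rest) clave contador ocurrencia cortar_en udp =
              (if PySem.Chars.isIn (PySem.Chars.lower clave) (PySem.Chars.lower line) then
                if contador + 1 = ocurrencia then String.mk (pvExtractA line clave cortar_en udp)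
                else pvLoopA rest clave (contador + 1) ocurrencia cortar_en udp
              else pvLoopA rest clave contador ocurrencia cortar_en udp) from rfl,
           hm', if_neg (by simp), ih contador, pvCanon_cons_skip _ _ _ _ _ _ hm']

theorem pvCanon_nil (clave : List Char) (n : Int) (cortar_en : Option String) (udp : Bool) :
    pvCanon [] clave n cortar_en udp = "No encontrado" := by
  simp only [pvCanon, List.filter_nil, List.length_nil, Int.natCast_zero]
  rw [if_neg (by omega)]

-- slice arithmetic
theorem pvDropShift (L t' : List Char) (m : Nat) :
    List.drop (L.length + m) (L ++ t') = List.drop m t' := by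
  rw [List.drop_append, List.drop_eq_nil_of_le (by omega), List.nil_append]
  congr 1; omega

theorem pvSliceShift (L t' : List Char) (a b : Nat) :
    PySem.List.slice (L ++ t') (some ((L.length + a : Nat) : Int)) (some ((L.length + b : Nat) : Int))
      = PySem.List.slice t' (some ((a : Nat) : Int)) (some ((b : Nat) : Int)) := by
  rw [PySem.List.slice_natCast, PySem.List.slice_natCast, pvDropShift]
  congr 1; omega

theorem pvSliceLine (l1 rest2 : List Char) (p : Nat) (hp : p ≤ l1.length) :
    PySem.List.slice (l1 ++ rest2) (some ((p : Nat) : Int)) (some ((l1.length : Nat) : Int))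
      = PySem.List.slice l1 (some ((p : Nat) : Int)) none := by
  rw [PySem.List.slice_natCast, PySem.List.slice_from l1 (by exact_mod_cast Int.natCast_nonneg p),
    Int.toNat_natCast, List.drop_append_of_le_length hp]
  exact List.take_left' (by simp [List.length_drop])

theorem pvSliceAll (xs : List Char) (p : Nat) :
    PySem.List.slice xs (some ((p : Nat) : Int)) (some ((xs.length : Nat) : Int))
      = PySem.List.slice xs (some ((p : Nat) : Int)) none := by
  rw [PySem.List.slice_natCast, PySem.List.slice_from xs (by exact_mod_cast Int.natCast_nonneg p),
    Int.toNat_natCast]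
  exact List.take_of_length_le (by simp [List.length_drop])

-- B's loop ignores a first line that does not contain the key
theorem pvLoopB_skip (l1 t' clave kl : List Char) (n : Int) (cortar_en : Option String) (udp : Bool)
    (hl1 : '\n' ∉ l1) (hknl : '\n' ∉ kl)
    (hnm : ¬ kl <:+: PySem.Chars.lower l1) :
    pvLoopB (l1 ++ '\n' :: t') clave kl n cortar_en udp = pvLoopB t' clave kl n cortar_en udp := by
  have hklne : kl ≠ [] := fun he => hnm (he ▸ List.nil_infix)
  have hlowc : PySem.Chars.lowerChar '\n' = '\n' := (pvLowerChar_nl '\n').2 rfl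
  have hlow : PySem.Chars.lower (l1 ++ '\n' :: t')
      = (PySem.Chars.lower l1 ++ ['\n']) ++ PySem.Chars.lower t' := by
    rw [pvLower_append, pvLower_cons, hlowc]; simp
  set a' := PySem.Chars.lower l1 with ha'
  set s' := PySem.Chars.lower t' with hs'
  have hlenA : (a' ++ ['\n']).length = l1.length + 1 := by
    simp [ha', pvLower_length]
  have hH : ∀ j < (a' ++ ['\n']).length, ¬ kl <+: List.drop j ((a' ++ ['\n']) ++ s') := by
    intro j hj hcon
    rw [List.append_assoc, List.singleton_append] at hcon
    have hj' : j ≤ a'.length := by simp at hj; omega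
    have hnlA : '\n' ∉ a' := by rw [ha', pvNl_mem_lower]; exact hl1
    exact hnm ((pvInfix_iff _ _).2 ⟨j, pvNoCross a' s' kl j hj' hknl hcon⟩)
  have hfind : PySem.Chars.find (PySem.Chars.lower (l1 ++ '\n' :: t')) kl =
      if PySem.Chars.find s' kl = -1 then -1 else ((a' ++ ['\n']).length : Int) + PySem.Chars.find s' kl := by
    rw [hlow]; exact pvFind_shift _ _ _ hH
  by_cases hfb : PySem.Chars.find s' kl = -1
  · rw [pvLoopB, pvLoopB]
    simp [hfind, hfb, ← hs']
  · -- the key occurs in t'; every quantity on the left is the right quantity shifted by |l1|+1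
    have hq0 : 0 ≤ PySem.Chars.find s' kl := by
      have := PySem.Chars.neg_one_le_find s' kl; omega
    set q : Nat := (PySem.Chars.find s' kl).toNat with hq
    have hqe : PySem.Chars.find s' kl = (q : Int) := by omega
    have hqle : q ≤ s'.length := by
      have := PySem.Chars.find_le_length s' kl; omega
    have hL : PySem.Chars.find (PySem.Chars.lower (l1 ++ '\n' :: t')) kl = ((l1.length + 1 + q : Nat) : Int) := by
      rw [hfind, if_neg hfb, hqe, hlenA]; push_cast; ring
    have hlen_low : (PySem.Chars.lower (l1 ++ '\n' :: t')).length = l1.length + 1 + s'.length := by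
      have h1 : a'.length = l1.length := by rw [ha']; exact pvLower_length l1
      rw [hlow]
      simp only [List.length_append, List.length_cons, List.length_nil, h1]
    have hdrop : List.drop (l1.length + 1 + q) (PySem.Chars.lower (l1 ++ '\n' :: t')) = List.drop q s' := by
      rw [hlow, show l1.length + 1 + q = (a' ++ ['\n']).length + q by rw [hlenA], List.append_assoc, ← List.append_assoc, pvDropShift]
    have hnlL : PySem.Chars.findFrom (PySem.Chars.lower (l1 ++ '\n' :: t')) ['\n'] ((l1.length + 1 + q : Nat) : Int)
        = if PySem.Chars.find (List.drop q s') ['\n'] = -1 then -1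
          else ((l1.length + 1 + q : Nat) : Int) + PySem.Chars.find (List.drop q s') ['\n'] := by
      rw [PySem.Chars.findFrom_natCast _ _ _ (by rw [hlen_low]; omega), hdrop]
    have hnlR : PySem.Chars.findFrom s' ['\n'] ((q : Nat) : Int)
        = if PySem.Chars.find (List.drop q s') ['\n'] = -1 then -1
          else ((q : Nat) : Int) + PySem.Chars.find (List.drop q s') ['\n'] := by
      rw [PySem.Chars.findFrom_natCast _ _ _ hqle]
    have htlen : (l1 ++ '\n' :: t').length = l1.length + 1 + t'.length := by
      simp only [List.length_append, List.length_cons]; omega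
    have hs'len : s'.length = t'.length := by rw [hs', pvLower_length]
    rw [pvLoopB, pvLoopB]
    simp only [← hs', hqe, hL, hnlL, hnlR]
    rw [dif_neg (show ¬(((l1.length + 1 + q : Nat) : Int) = -1) by omega),
        dif_neg (show ¬(((q : Nat) : Int) = -1) by omega)]
    by_cases hr : PySem.Chars.find (List.drop q s') ['\n'] = -1
    · simp only [hr, reduceIte, reduceDIte]
      by_cases hn1 : n - 1 = 0
      · rw [if_pos hn1, if_pos hn1]
        congr 2
        rw [htlen, ← hs'len]
        rw [show ((l1.length + 1 + q : Nat) : Int) + (clave.length : Int) = ((l1.length + 1 + (q + clave.length) : Nat) : Int) by push_cast; ring]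
        rw [show ((q : Nat) : Int) + (clave.length : Int) = ((q + clave.length : Nat) : Int) by push_cast; ring]
        rw [show (l1 ++ '\n' :: t') = (l1 ++ ['\n']) ++ t' by simp]
        rw [show ((l1.length + 1 + (q + clave.length) : Nat) : Int) = (((l1 ++ ['\n']).length + (q + clave.length) : Nat) : Int) by simp]
        rw [show ((l1.length + 1 + s'.length : Nat) : Int) = (((l1 ++ ['\n']).length + s'.length : Nat) : Int) by simp]
        rw [pvSliceShift, hs'len]
      · rw [if_neg hn1, if_neg hn1]
    · have hr0 : 0 ≤ PySem.Chars.find (List.drop q s') ['\n'] := by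
        have := PySem.Chars.neg_one_le_find (List.drop q s') ['\n']; omega
      set r : Nat := (PySem.Chars.find (List.drop q s') ['\n']).toNat with hrdef
      have hre : PySem.Chars.find (List.drop q s') ['\n'] = (r : Int) := by omega
      simp only [hre] at hr ⊢
      rw [if_neg hr, if_neg hr]
      rw [if_neg (show ¬(((l1.length + 1 + q : Nat) : Int) + (r : Int) = -1) by omega),
          if_neg (show ¬(((q : Nat) : Int) + (r : Int) = -1) by omega)]
      by_cases hn1 : n - 1 = 0
      · rw [if_pos hn1, if_pos hn1]
        congr 2
        rw [show ((l1.length + 1 + q : Nat) : Int) + (clave.length : Int) = ((l1.length + 1 + (q + clave.length) : Nat) : Int) by push_cast; ring]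
        rw [show ((l1.length + 1 + q : Nat) : Int) + (r : Int) = ((l1.length + 1 + (q + r) : Nat) : Int) by push_cast; ring]
        rw [show ((q : Nat) : Int) + (clave.length : Int) = ((q + clave.length : Nat) : Int) by push_cast; ring]
        rw [show ((q : Nat) : Int) + (r : Int) = ((q + r : Nat) : Int) by push_cast; ring]
        rw [show (l1 ++ '\n' :: t') = (l1 ++ ['\n']) ++ t' by simp]
        rw [show ((l1.length + 1 + (q + clave.length) : Nat) : Int) = (((l1 ++ ['\n']).length + (q + clave.length) : Nat) : Int) by simp]
        rw [show ((l1.length + 1 + (q + r) : Nat) : Int) = (((l1 ++ ['\n']).length + (q + r) : Nat) : Int) by simp]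
        rw [pvSliceShift]
      · rw [if_neg hn1, if_neg hn1]
        rw [dif_neg (show ¬(((l1.length + 1 + q : Nat) : Int) + (r : Int) = -1) by omega),
            dif_neg (show ¬(((q : Nat) : Int) + (r : Int) = -1) by omega)]
        congr 1
        rw [show ((l1.length + 1 + q : Nat) : Int) + (r : Int) + 1 = ((l1.length + 1 + (q + r + 1) : Nat) : Int) by push_cast; ring]
        rw [show ((q : Nat) : Int) + (r : Int) + 1 = ((q + r + 1 : Nat) : Int) by push_cast; ring]
        rw [PySem.List.slice_from _ (by exact_mod_cast Int.natCast_nonneg (l1.length + 1 + (q + r + 1))),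
          PySem.List.slice_from _ (by exact_mod_cast Int.natCast_nonneg (q + r + 1)), Int.toNat_natCast, Int.toNat_natCast]
        rw [show (l1 ++ '\n' :: t') = (l1 ++ ['\n']) ++ t' by simp]
        rw [show l1.length + 1 + (q + r + 1) = (l1 ++ ['\n']).length + (q + r + 1) by simp]
        rw [pvDropShift]

-- B's loop computes the canonical value
theorem pvLoopB_eq (clave : List Char) (cortar_en : Option String) (udp : Bool)
    (hknl : '\n' ∉ PySem.Chars.lower clave) (t : List Char) (n : Int) :
    pvLoopB t clave (PySem.Chars.lower clave) n cortar_en udp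
      = pvCanon (pvSplit t) clave n cortar_en udp := by
  have main : ∀ (N : Nat) (t : List Char), t.length < N → ∀ n : Int,
      pvLoopB t clave (PySem.Chars.lower clave) n cortar_en udp
        = pvCanon (pvSplit t) clave n cortar_en udp := by
    intro N
    induction N with
    | zero => intro t h; omega
    | succ N ih =>
        intro t hlt n
        set kl := PySem.Chars.lower clave with hkl
        by_cases hmem : '\n' ∈ t
        · obtain ⟨l1, t', rfl, hl1⟩ := pvExists_first '\n' t hmem
          rw [pvSplit_append l1 t' hl1]
          by_cases hm : kl <:+: PySem.Chars.lower l1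
          · -- the key occurs in the first line: B extracts here (n = 1) or jumps behind the newline
            have hnlA : '\n' ∉ PySem.Chars.lower l1 := by rw [pvNl_mem_lower]; exact hl1
            have hq0 : 0 ≤ PySem.Chars.find (PySem.Chars.lower l1) kl :=
              (PySem.Chars.find_nonneg_iff _ _).2 hm
            set q : Nat := (PySem.Chars.find (PySem.Chars.lower l1) kl).toNat with hq
            have hqe : PySem.Chars.find (PySem.Chars.lower l1) kl = (q : Int) := by omega
            have hqlen : q + kl.length ≤ l1.length := by
              obtain ⟨hpre, -⟩ := PySem.Chars.find_spec hq0
              have h1 := hpre.length_le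
              have h2 := PySem.Chars.find_le_length (PySem.Chars.lower l1) kl
              simp only [List.length_drop, pvLower_length] at h1 h2 ⊢
              omega
            have hlowc : PySem.Chars.lowerChar '\n' = '\n' := (pvLowerChar_nl '\n').2 rfl
            have hlow : PySem.Chars.lower (l1 ++ '\n' :: t')
                = PySem.Chars.lower l1 ++ '\n' :: PySem.Chars.lower t' := by
              rw [pvLower_append, pvLower_cons, hlowc]
            have hfind : PySem.Chars.find (PySem.Chars.lower (l1 ++ '\n' :: t')) kl = (q : Int) := by
              rw [hlow, show PySem.Chars.lower l1 ++ '\n' :: PySem.Chars.lower t'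
                    = PySem.Chars.lower l1 ++ ('\n' :: PySem.Chars.lower t') from rfl,
                pvFind_append_left _ _ _ hm, hqe]
            have hlen_l1 : (PySem.Chars.lower l1).length = l1.length := pvLower_length l1
            have hnl : PySem.Chars.findFrom (PySem.Chars.lower (l1 ++ '\n' :: t')) ['\n'] ((q : Nat) : Int)
                = ((l1.length : Nat) : Int) := by
              rw [PySem.Chars.findFrom_natCast _ _ _ (by rw [pvLower_length]; simp; omega)]
              rw [hlow, List.drop_append_of_le_length (by omega)]
              have hdr : '\n' ∉ List.drop q (PySem.Chars.lower l1) :=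
                fun hc => hnlA (List.mem_of_mem_drop hc)
              rw [pvFind_nl_of_split _ _ hdr]
              rw [if_neg (by simp [List.length_drop])]
              simp only [List.length_drop]
              push_cast
              omega
            rw [pvLoopB]
            simp only [← hkl, hfind]
            rw [dif_neg (by omega)]
            simp only [hnl]
            rw [pvCanon_cons_match _ _ _ _ _ _ ((PySem.Chars.isIn_iff_infix _ _).2 hm)]
            by_cases hn1 : n = 1
            · rw [if_pos (by omega), if_pos hn1]
              unfold pvExtractA
              simp only [← hkl, hqe]
              congr 2
              rw [if_neg (by omega)]
              rw [show ((q : Nat) : Int) + (clave.length : Int) = ((q + clave.length : Nat) : Int) by push_cast; ring]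
              rw [show (l1 ++ '\n' :: t') = l1 ++ ('\n' :: t') from rfl]
              rw [pvSliceLine l1 ('\n' :: t') (q + clave.length)
                (by have : kl.length = clave.length := by rw [hkl, pvLower_length]
                    omega)]
            · rw [if_neg (by omega), if_neg hn1]
              rw [dif_neg (by simp)]
              have harg : PySem.List.slice (l1 ++ '\n' :: t') (some (((l1.length : Nat) : Int) + 1)) none = t' := by
                rw [PySem.List.slice_from _ (by omega)]
                rw [show (((l1.length : Nat) : Int) + 1).toNat = (l1 ++ ['\n']).length by simp]
                rw [show (l1 ++ '\n' :: t') = (l1 ++ ['\n']) ++ t' by simp]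
                exact List.drop_left' rfl
              rw [harg]
              exact ih t' (by simp at hlt; omega) (n - 1)
          · -- first line does not match: B skips it, A's canonical value drops it
            have := pvLoopB_skip l1 t' clave kl n cortar_en udp hl1 (hkl ▸ hknl) hm
            rw [this, pvCanon_cons_skip _ _ _ _ _ _ (by
              rw [← Bool.not_eq_true, PySem.Chars.isIn_iff_infix]; exact hm)]
            exact ih t' (by simp at hlt; omega) n
        · -- no newline at all: single line
          rw [pvSplit_of_not_mem t hmem]
          have hnlow : '\n' ∉ PySem.Chars.lower t := by rw [pvNl_mem_lower]; exact hmem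
          by_cases hm : kl <:+: PySem.Chars.lower t
          · have hq0 : 0 ≤ PySem.Chars.find (PySem.Chars.lower t) kl :=
              (PySem.Chars.find_nonneg_iff _ _).2 hm
            set q : Nat := (PySem.Chars.find (PySem.Chars.lower t) kl).toNat with hq
            have hqe : PySem.Chars.find (PySem.Chars.lower t) kl = (q : Int) := by omega
            have hqlen : q ≤ t.length := by
              have := PySem.Chars.find_le_length (PySem.Chars.lower t) kl
              rw [pvLower_length] at this; omega
            have hnl : PySem.Chars.findFrom (PySem.Chars.lower t) ['\n'] ((q : Nat) : Int) = -1 := by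
              rw [PySem.Chars.findFrom_natCast _ _ _ (by rw [pvLower_length]; omega)]
              rw [pvFind_nl_none _ (fun hc => hnlow (List.mem_of_mem_drop hc))]
              simp
            rw [pvLoopB]
            simp only [← hkl, hqe]
            rw [dif_neg (by omega)]
            simp only [hnl]
            rw [pvCanon_cons_match _ _ _ _ _ _ ((PySem.Chars.isIn_iff_infix _ _).2 hm)]
            by_cases hn1 : n = 1
            · rw [if_pos (by omega), if_pos hn1]
              unfold pvExtractA
              simp only [← hkl, hqe]
              congr 2
              rw [if_pos trivial]
              rw [show ((q : Nat) : Int) + (clave.length : Int) = ((q + clave.length : Nat) : Int) by push_cast; ring]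
              rw [show (t.length : Int) = ((t.length : Nat) : Int) from rfl]
              rw [pvSliceAll]
            · rw [if_neg (by omega), if_neg hn1]
              rw [dif_pos trivial, pvCanon_nil]
          · have hfm : PySem.Chars.find (PySem.Chars.lower t) kl = -1 :=
              (PySem.Chars.find_eq_neg_one_iff _ _).2 hm
            rw [pvLoopB]
            simp only [← hkl, hfm]
            rw [dif_pos trivial]
            rw [pvCanon_cons_skip _ _ _ _ _ _ (by
              rw [← Bool.not_eq_true, PySem.Chars.isIn_iff_infix]; exact hm), pvCanon_nil]
  exact main (t.length + 1) t (by omega) n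

-- ===== VERDICT (by name: the statement is the Claim_ definition above) =====
theorem buscar_valor_multiple_spec : Claim_equal_buscar_valor_multiple := by
  intro texto clave oc cortar udp _
  unfold Spec_buscar_valor_multiple buscar_valor_multiple buscar_valor_multiple_alt
  have hsplit : (PySem.Chars.split? texto.toList "\n".toList).getD [] = pvSplit texto.toList := by
    rw [show "\n".toList = ['\n'] from rfl, PySem.Chars.split?]
    simp [pvSplitOn_eq]
  rw [hsplit, pvLoopA_eq]
  by_cases hg : PySem.Chars.isIn "\n".toList clave.toList = true
  · rw [if_pos hg]
    have hfe : (pvSplit texto.toList).filter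
        (fun l => PySem.Chars.isIn (PySem.Chars.lower clave.toList) (PySem.Chars.lower l)) = [] := by
      rw [List.filter_eq_nil_iff]
      intro l hl hcon
      have hinf := (PySem.Chars.isIn_iff_infix _ _).1 hcon
      have hkm : '\n' ∈ PySem.Chars.lower clave.toList := by
        rw [pvNl_mem_lower]
        have := (PySem.Chars.isIn_iff_infix _ _).1 hg
        rw [show "\n".toList = ['\n'] from rfl] at this
        exact this.subset List.mem_cons_self
      have : '\n' ∈ PySem.Chars.lower l := hinf.subset hkm
      exact pvSplit_mem texto.toList l hl ((pvNl_mem_lower l).1 this)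
    simp only [pvCanon, hfe, List.length_nil, Int.natCast_zero]
    rw [if_neg (by omega)]
  · rw [if_neg hg]
    have hknl : '\n' ∉ PySem.Chars.lower clave.toList := by
      rw [pvNl_mem_lower]
      intro hmem
      apply hg
      rw [show "\n".toList = ['\n'] from rfl, PySem.Chars.isIn_iff_infix]
      obtain ⟨s1, s2, he⟩ := List.append_of_mem hmem
      exact ⟨s1, s2, by rw [he]; simp⟩
    rw [pvLoopB_eq clave.toList cortar udp hknl texto.toList oc]
    congr 1
    omega
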